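-- pv_equiv track=rewrite | github.com/touge13/Algorithms | TrainingAlgorithms6.0/2 (полный балл)/G.py | max_length_substring
-- ===== SOURCE A (Python) =====
-- def max_length_substring(n, c, s):
--     left = 0
--     count_a = 0
--     count_b = 0
--     count_ab = 0
--     max_length = 0
--
--     for right in range(n):
--         if s[right] == 'a':
--             count_a += 1
--         elif s[right] == 'b':
--             count_b += 1
--             count_ab += count_a
--         while count_ab > c:
--             if s[left] == 'a':
--                 count_a -= 1
--                 count_ab -= count_b
--             elif s[left] == 'b':
--                 count_b -= 1
--             left += 1
--             if left > right:
--                 break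
--         max_length = max(max_length, right - left + 1)
--     return max_length
-- ===== SOURCE B (Python) =====
-- def max_length_substring(n, c, s):
--     best = 0
--     for l in range(n):
--         ca = 0
--         ab = 0
--         for r in range(l, n):
--             ch = s[r]
--             if ch == 'a':
--                 ca += 1
--             elif ch == 'b':
--                 ab += ca
--             if ab <= c:
--                 best = max(best, r - l + 1)
--     return best
-- ===== Notes on version B (the rewrite author's own statement) =====
-- stated objective: simpler
-- what changed: Replaces A's one-pass two-pointer sliding window (with incremental count decrements and a break-guarded shrink loop) by a plain exhaustive scan: for every start index one left-to-right pass keeps a running count of 'a's and 'ab' pairs and records every feasible window length.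
import Mathlib
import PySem

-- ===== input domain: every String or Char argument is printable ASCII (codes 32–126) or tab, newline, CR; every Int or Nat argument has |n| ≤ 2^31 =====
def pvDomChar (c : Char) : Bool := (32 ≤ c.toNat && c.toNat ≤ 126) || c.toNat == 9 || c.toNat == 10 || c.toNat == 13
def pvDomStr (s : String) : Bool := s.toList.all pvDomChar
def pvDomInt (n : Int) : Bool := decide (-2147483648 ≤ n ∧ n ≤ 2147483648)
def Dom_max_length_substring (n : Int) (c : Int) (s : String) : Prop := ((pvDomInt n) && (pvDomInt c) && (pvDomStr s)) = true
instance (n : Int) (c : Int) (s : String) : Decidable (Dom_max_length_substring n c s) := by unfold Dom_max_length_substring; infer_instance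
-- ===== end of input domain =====

-- B replaces A's one-pass two-pointer sliding window (with incremental shrink bookkeeping)
-- by a plainly simpler exhaustive scan over all window starts (objective: simpler, not faster).

-- ===== PORT A =====
-- the inner `while count_ab > c: ...` loop of A
def pvShrinkA (s : String) (c : Int) (right : Int) (left ca cb cab : Int) : Int × Int × Int × Int :=
  if cab > c then
    let st :=
      match PySem.Str.pyGet? s left with
      | some ch =>
        if ch = 'a' then (ca - 1, cb, cab - cb)
        else if ch = 'b' then (ca, cb - 1, cab)
        else (ca, cb, cab)
      | none => (ca, cb, cab)   -- unreachable under Pre_: Python raises IndexError here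
    let left' := left + 1
    if left' > right then (left', st.1, st.2.1, st.2.2)
    else pvShrinkA s c right left' st.1 st.2.1 st.2.2
  else (left, ca, cb, cab)
termination_by (right + 1 - left).toNat
decreasing_by omega

def max_length_substring (n : Int) (c : Int) (s : String) : Int :=
  ((PySem.List.pyRange 0 n 1).foldl (fun st right =>
      let upd :=
        match PySem.Str.pyGet? s right with
        | some ch =>
          if ch = 'a' then (st.2.1 + 1, st.2.2.1, st.2.2.2.1)
          else if ch = 'b' then (st.2.1, st.2.2.1 + 1, st.2.2.2.1 + st.2.1)
          else (st.2.1, st.2.2.1, st.2.2.2.1)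
        | none => (st.2.1, st.2.2.1, st.2.2.2.1)   -- unreachable under Pre_
      let sh := pvShrinkA s c right st.1 upd.1 upd.2.1 upd.2.2
      (sh.1, sh.2.1, sh.2.2.1, sh.2.2.2, max st.2.2.2.2 (right - sh.1 + 1)))
    ((0 : Int), (0 : Int), (0 : Int), (0 : Int), (0 : Int))).2.2.2.2

-- ===== PORT B =====
def max_length_substring_alt (n : Int) (c : Int) (s : String) : Int :=
  (PySem.List.pyRange 0 n 1).foldl (fun best l =>
    ((PySem.List.pyRange l n 1).foldl (fun st r =>
        let upd :=
          match PySem.Str.pyGet? s r with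
          | some ch =>
            if ch = 'a' then (st.1 + 1, st.2.1)
            else if ch = 'b' then (st.1, st.2.1 + st.1)
            else (st.1, st.2.1)
          | none => (st.1, st.2.1)   -- unreachable under Pre_
        (upd.1, upd.2, if upd.2 ≤ c then max st.2.2 (r - l + 1) else st.2.2))
      ((0 : Int), (0 : Int), best)).2.2) 0

-- ===== PRECONDITION & SPEC =====
-- Pre_ excludes exactly the inputs on which Python A raises IndexError: n beyond the length of s.
def Pre_max_length_substring (n : Int) (c : Int) (s : String) : Prop :=
  n ≤ (s.toList.length : Int)
instance (n : Int) (c : Int) (s : String) : Decidable (Pre_max_length_substring n c s) := by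
  unfold Pre_max_length_substring; infer_instance

def pvWitness_max_length_substring : Int × Int × String := (4, 1, "abab")

def Spec_max_length_substring (n : Int) (c : Int) (s : String) (out : Int) : Prop := out = max_length_substring_alt n c s
instance (n : Int) (c : Int) (s : String) (out : Int) : Decidable (Spec_max_length_substring n c s out) := by unfold Spec_max_length_substring; infer_instance

-- ===== CLAIM (what is proved, stated in full; the proofs are below) =====
def Claim_equal_max_length_substring : Prop := ∀ (n : Int) (c : Int) (s : String), Dom_max_length_substring n c s → Pre_max_length_substring n c s → Spec_max_length_substring n c s (max_length_substring n c s)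

-- ===== LEMMAS AND PROOFS =====

-- (count_a, count_b, count_ab) of one character added on the right
def pvG3 (st : Int × Int × Int) (ch : Char) : Int × Int × Int :=
  if ch = 'a' then (st.1 + 1, st.2.1, st.2.2)
  else if ch = 'b' then (st.1, st.2.1 + 1, st.2.2 + st.1)
  else st

-- counts of a whole character list
def pvCnt (w : List Char) : Int × Int × Int := w.foldl pvG3 (0, 0, 0)

-- the half-open window [l, r) of t
def pvWnd (t : List Char) (l r : Nat) : List Char := (t.drop l).take (r - l)

-- x is THE answer for prefix length m: an upper bound on all feasible window lengths, and attained (or 0)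
def pvGoodAt (c : Int) (t : List Char) (m : Nat) (x : Int) : Prop :=
  0 ≤ x ∧
  (∀ l r : Nat, l ≤ r → r ≤ m → (pvCnt (pvWnd t l r)).2.2 ≤ c → (r : Int) - (l : Int) ≤ x) ∧
  (x = 0 ∨ ∃ l r : Nat, l ≤ r ∧ r ≤ m ∧ (pvCnt (pvWnd t l r)).2.2 ≤ c ∧ x = (r : Int) - (l : Int))

theorem pvGoodAt_unique {c : Int} {t : List Char} {m : Nat} {x y : Int}
    (hx : pvGoodAt c t m x) (hy : pvGoodAt c t m y) : x = y := by
  obtain ⟨hx0, hxu, hxa⟩ := hx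
  obtain ⟨hy0, hyu, hya⟩ := hy
  rcases hxa with rfl | ⟨l, r, hlr, hrm, hf, rfl⟩
  · rcases hya with rfl | ⟨l, r, hlr, hrm, hf, rfl⟩
    · rfl
    · have := hxu l r hlr hrm hf; omega
  · have h1 := hyu l r hlr hrm hf
    rcases hya with rfl | ⟨l', r', hlr', hrm', hf', rfl⟩
    · have := hxu l r hlr hrm hf; omega
    · have := hxu l' r' hlr' hrm' hf'; omega

theorem pvCnt_shift (w : List Char) (ca cb cab : Int) :
    w.foldl pvG3 (ca, cb, cab) =
      (ca + (pvCnt w).1, cb + (pvCnt w).2.1, cab + (pvCnt w).2.2 + ca * (pvCnt w).2.1) := by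
  induction w generalizing ca cb cab with
  | nil => simp [pvCnt]
  | cons ch w ih =>
    have hc : pvCnt (ch :: w) = (ch :: w).foldl pvG3 (0, 0, 0) := rfl
    rw [hc]
    simp only [List.foldl_cons]
    rw [ih, ih]
    by_cases ha : ch = 'a'
    · simp [pvG3, ha]; and_intros <;> ring
    · by_cases hb : ch = 'b'
      · simp [pvG3, ha, hb]; and_intros <;> ring
      · simp [pvG3, ha, hb]

theorem pvCnt_snoc (w : List Char) (ch : Char) : pvCnt (w ++ [ch]) = pvG3 (pvCnt w) ch := by
  simp [pvCnt, List.foldl_append]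

theorem pvCnt_cons (ch : Char) (w : List Char) :
    pvCnt (ch :: w) =
      (if ch = 'a' then (pvCnt w).1 + 1 else (pvCnt w).1,
       if ch = 'b' then (pvCnt w).2.1 + 1 else (pvCnt w).2.1,
       if ch = 'a' then (pvCnt w).2.2 + (pvCnt w).2.1 else (pvCnt w).2.2) := by
  have hc : pvCnt (ch :: w) = w.foldl pvG3 (pvG3 (0, 0, 0) ch) := by
    simp [pvCnt]
  rw [hc]
  by_cases ha : ch = 'a'
  · simp [pvG3, ha, pvCnt_shift]; ring
  · by_cases hb : ch = 'b'
    · simp [pvG3, ha, hb, pvCnt_shift]; ring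
    · simp [pvG3, ha, hb, pvCnt_shift]

theorem pvCnt_nonneg (w : List Char) :
    0 ≤ (pvCnt w).1 ∧ 0 ≤ (pvCnt w).2.1 ∧ 0 ≤ (pvCnt w).2.2 := by
  induction w using List.reverseRecOn with
  | nil => simp [pvCnt]
  | append_singleton w ch ih =>
    rw [pvCnt_snoc]
    unfold pvG3
    split_ifs <;> first | exact ih | (simp; omega)

theorem pvWnd_nil (t : List Char) (l : Nat) : pvWnd t l l = [] := by
  simp [pvWnd]

theorem pvWnd_succ_right (t : List Char) (l r : Nat) (hlr : l ≤ r) (hr : r < t.length) :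
    pvWnd t l (r + 1) = pvWnd t l r ++ [t[r]] := by
  unfold pvWnd
  have h1 : r + 1 - l = (r - l) + 1 := by omega
  rw [h1, List.take_succ]
  congr 1
  have h2 : (t.drop l)[r - l]? = t[l + (r - l)]? := List.getElem?_drop ..
  have h3 : l + (r - l) = r := by omega
  rw [h2, h3, List.getElem?_eq_getElem hr]
  rfl

theorem pvWnd_cons (t : List Char) (l r : Nat) (hlr : l < r) (hl : l < t.length) :
    pvWnd t l r = t[l] :: pvWnd t (l + 1) r := by
  unfold pvWnd
  rw [List.drop_eq_getElem_cons hl]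
  have h1 : r - l = (r - (l + 1)) + 1 := by omega
  rw [h1, List.take_succ_cons]

-- extending a window on the right can only increase the ab-count
theorem pvAB_mono_right (t : List Char) (l r : Nat) (hlr : l ≤ r) (hr : r < t.length) :
    (pvCnt (pvWnd t l r)).2.2 ≤ (pvCnt (pvWnd t l (r + 1))).2.2 := by
  rw [pvWnd_succ_right t l r hlr hr, pvCnt_snoc]
  have := pvCnt_nonneg (pvWnd t l r)
  unfold pvG3
  split_ifs <;> simp <;> omega

-- ===== A-side =====

def pvAInv (c : Int) (t : List Char) (k : Nat) (st : Int × Int × Int × Int × Int) : Prop :=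
  ∃ L : Nat, st.1 = (L : Int) ∧ L ≤ k ∧
    (st.2.1, st.2.2.1, st.2.2.2.1) = pvCnt (pvWnd t L k) ∧
    (∀ l : Nat, l < L → c < (pvCnt (pvWnd t l k)).2.2) ∧
    ((pvCnt (pvWnd t L k)).2.2 ≤ c ∨ L = k) ∧
    pvGoodAt c t k st.2.2.2.2

theorem pvShrink_spec (s : String) (c : Int) (k : Nat) (hk : k < s.toList.length)
    (d : Nat) :
    ∀ L : Nat, L ≤ k + 1 → k + 1 - L = d →
    (c < (pvCnt (pvWnd s.toList L (k + 1))).2.2 → L ≤ k) →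
    (∀ l : Nat, l < L → c < (pvCnt (pvWnd s.toList l (k + 1))).2.2) →
    ∃ L' : Nat,
      pvShrinkA s c (k : Int) (L : Int)
          (pvCnt (pvWnd s.toList L (k + 1))).1
          (pvCnt (pvWnd s.toList L (k + 1))).2.1
          (pvCnt (pvWnd s.toList L (k + 1))).2.2
        = ((L' : Int), (pvCnt (pvWnd s.toList L' (k + 1))).1,
            (pvCnt (pvWnd s.toList L' (k + 1))).2.1,
            (pvCnt (pvWnd s.toList L' (k + 1))).2.2) ∧
      L ≤ L' ∧ L' ≤ k + 1 ∧
      (∀ l : Nat, l < L' → c < (pvCnt (pvWnd s.toList l (k + 1))).2.2) ∧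
      ((pvCnt (pvWnd s.toList L' (k + 1))).2.2 ≤ c ∨ L' = k + 1) := by
  induction d with
  | zero =>
    intro L hL hd hguard hmin
    have hL1 : L = k + 1 := by omega
    subst hL1
    rw [pvShrinkA]
    have hcnt : pvCnt (pvWnd s.toList (k + 1) (k + 1)) = (0, 0, 0) := by
      rw [pvWnd_nil]; rfl
    by_cases hcab : c < (pvCnt (pvWnd s.toList (k + 1) (k + 1))).2.2
    · exact absurd (hguard hcab) (by omega)
    · rw [if_neg (by omega)]
      exact ⟨k + 1, rfl, le_refl _, le_refl _, hmin, Or.inr rfl⟩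
  | succ d ih =>
    intro L hL hd hguard hmin
    rw [pvShrinkA]
    by_cases hcab : c < (pvCnt (pvWnd s.toList L (k + 1))).2.2
    case neg =>
      rw [if_neg (by omega)]
      exact ⟨L, rfl, le_refl _, hL, hmin, Or.inl (by omega)⟩
    case pos =>
      have hLk : L ≤ k := hguard hcab
      rw [if_pos (by omega)]
      have hlen : L < s.toList.length := by omega
      have hget : PySem.Str.pyGet? s (L : Int) = some (s.toList[L]) := by
        rw [PySem.Str.pyGet?_natCast, List.getElem?_eq_getElem hlen]
      have hwnd : pvWnd s.toList L (k + 1) = s.toList[L] :: pvWnd s.toList (L + 1) (k + 1) :=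
        pvWnd_cons _ _ _ (by omega) hlen
      have hca : (pvCnt (pvWnd s.toList L (k + 1))).1
          = (if s.toList[L] = 'a' then (pvCnt (pvWnd s.toList (L + 1) (k + 1))).1 + 1
             else (pvCnt (pvWnd s.toList (L + 1) (k + 1))).1) := by
        rw [hwnd, pvCnt_cons]
      have hcb : (pvCnt (pvWnd s.toList L (k + 1))).2.1
          = (if s.toList[L] = 'b' then (pvCnt (pvWnd s.toList (L + 1) (k + 1))).2.1 + 1
             else (pvCnt (pvWnd s.toList (L + 1) (k + 1))).2.1) := by
        rw [hwnd, pvCnt_cons]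
      have hab : (pvCnt (pvWnd s.toList L (k + 1))).2.2
          = (if s.toList[L] = 'a' then (pvCnt (pvWnd s.toList (L + 1) (k + 1))).2.2
               + (pvCnt (pvWnd s.toList (L + 1) (k + 1))).2.1
             else (pvCnt (pvWnd s.toList (L + 1) (k + 1))).2.2) := by
        rw [hwnd, pvCnt_cons]
      simp only [hget]
      have hst : (if s.toList[L] = 'a' then ((pvCnt (pvWnd s.toList L (k + 1))).1 - 1,
                (pvCnt (pvWnd s.toList L (k + 1))).2.1,
                (pvCnt (pvWnd s.toList L (k + 1))).2.2 - (pvCnt (pvWnd s.toList L (k + 1))).2.1)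
            else if s.toList[L] = 'b' then ((pvCnt (pvWnd s.toList L (k + 1))).1,
                (pvCnt (pvWnd s.toList L (k + 1))).2.1 - 1,
                (pvCnt (pvWnd s.toList L (k + 1))).2.2)
            else ((pvCnt (pvWnd s.toList L (k + 1))).1,
                (pvCnt (pvWnd s.toList L (k + 1))).2.1,
                (pvCnt (pvWnd s.toList L (k + 1))).2.2))
          = pvCnt (pvWnd s.toList (L + 1) (k + 1)) := by
        by_cases ha : s.toList[L] = 'a'
        · simp only [ha, if_pos rfl]
          rw [hca, hcb, hab]
          simp [ha, Prod.ext_iff]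
        · by_cases hb : s.toList[L] = 'b'
          · simp only [hb, if_neg ha, if_pos rfl]
            rw [hca, hcb, hab]
            simp [ha, hb, Prod.ext_iff]
          · simp only [if_neg ha, if_neg hb]
            rw [hca, hcb, hab]
            simp [ha, hb, Prod.ext_iff]
      have hmin' : ∀ l : Nat, l < L + 1 → c < (pvCnt (pvWnd s.toList l (k + 1))).2.2 := by
        intro l hl
        rcases Nat.lt_succ_iff_lt_or_eq.mp hl with h | h
        · exact hmin l h
        · subst h; exact hcab
      by_cases hbreak : L = k
      · subst hbreak
        rw [if_pos (by omega)]
        refine ⟨L + 1, ?_, by omega, le_refl _, hmin', Or.inr rfl⟩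
        rw [hst]
        simp [Prod.ext_iff]
      · rw [if_neg (by omega)]
        obtain ⟨L', heq, hLL', hL'k, hmin'', hpost⟩ :=
          ih (L + 1) (by omega) (by omega) (fun _ => by omega) hmin'
        refine ⟨L', ?_, by omega, hL'k, hmin'', hpost⟩
        rw [hst]
        have hcast : ((L : Int) + 1) = ((L + 1 : Nat) : Int) := by push_cast; ring
        rw [hcast]
        exact heq

theorem pvGood_step (c : Int) (t : List Char) (k : Nat) (L' : Nat) (hL' : L' ≤ k + 1) (ml : Int)
    (hgood : pvGoodAt c t k ml)
    (hmin : ∀ l : Nat, l < L' → c < (pvCnt (pvWnd t l (k + 1))).2.2)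
    (hpost : (pvCnt (pvWnd t L' (k + 1))).2.2 ≤ c ∨ L' = k + 1) :
    pvGoodAt c t (k + 1) (max ml ((k : Int) - (L' : Int) + 1)) := by
  obtain ⟨h0, hub, hat⟩ := hgood
  have hmx1 := le_max_left ml ((k : Int) - (L' : Int) + 1)
  have hmx2 := le_max_right ml ((k : Int) - (L' : Int) + 1)
  refine ⟨by omega, ?_, ?_⟩
  · intro l r hlr hrm hf
    by_cases hr : r ≤ k
    · have := hub l r hlr hr hf; omega
    · have hr1 : r = k + 1 := by omega
      subst hr1
      have hlL : L' ≤ l := by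
        by_contra hcon
        have := hmin l (by omega)
        omega
      have hcast : (L' : Int) ≤ (l : Int) := by exact_mod_cast hlL
      push_cast
      omega
  · by_cases hml : (k : Int) - (L' : Int) + 1 ≤ ml
    · rw [max_eq_left hml]
      rcases hat with rfl | ⟨l, r, h1, h2, h3, h4⟩
      · exact Or.inl rfl
      · exact Or.inr ⟨l, r, h1, by omega, h3, h4⟩
    · rw [max_eq_right (by omega)]
      have hL'k : L' ≤ k := by omega
      rcases hpost with hp | hp
      · exact Or.inr ⟨L', k + 1, by omega, le_refl _, hp, by push_cast; ring⟩
      · omega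

theorem pvA_step (s : String) (c : Int) (k : Nat) (hk : k < s.toList.length)
    (st : Int × Int × Int × Int × Int) (h : pvAInv c s.toList k st) :
    pvAInv c s.toList (k + 1)
      (let upd :=
        match PySem.Str.pyGet? s (k : Int) with
        | some ch =>
          if ch = 'a' then (st.2.1 + 1, st.2.2.1, st.2.2.2.1)
          else if ch = 'b' then (st.2.1, st.2.2.1 + 1, st.2.2.2.1 + st.2.1)
          else (st.2.1, st.2.2.1, st.2.2.2.1)
        | none => (st.2.1, st.2.2.1, st.2.2.2.1)
       let sh := pvShrinkA s c (k : Int) st.1 upd.1 upd.2.1 upd.2.2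
       (sh.1, sh.2.1, sh.2.2.1, sh.2.2.2, max st.2.2.2.2 ((k : Int) - sh.1 + 1))) := by
  obtain ⟨L, hleft, hLk, hcnt, hmin, hpost, hgood⟩ := h
  have hget : PySem.Str.pyGet? s (k : Int) = some (s.toList[k]) := by
    rw [PySem.Str.pyGet?_natCast, List.getElem?_eq_getElem hk]
  dsimp only
  simp only [hget]
  have hupd : (if s.toList[k] = 'a' then (st.2.1 + 1, st.2.2.1, st.2.2.2.1)
      else if s.toList[k] = 'b' then (st.2.1, st.2.2.1 + 1, st.2.2.2.1 + st.2.1)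
      else (st.2.1, st.2.2.1, st.2.2.2.1))
      = pvCnt (pvWnd s.toList L (k + 1)) := by
    rw [pvWnd_succ_right _ _ _ hLk hk, pvCnt_snoc, ← hcnt]
    unfold pvG3
    split_ifs <;> rfl
  rw [hupd, hleft]
  have hminext : ∀ l : Nat, l < L → c < (pvCnt (pvWnd s.toList l (k + 1))).2.2 := by
    intro l hl
    exact lt_of_lt_of_le (hmin l hl) (pvAB_mono_right s.toList l k (by omega) hk)
  obtain ⟨L', heq, hLL', hL'1, hmin', hpost'⟩ :=
    pvShrink_spec s c k hk (k + 1 - L) L (by omega) rfl (fun _ => hLk) hminext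
  rw [heq]
  exact ⟨L', rfl, hL'1, rfl, hmin', hpost', pvGood_step c s.toList k L' hL'1 st.2.2.2.2 hgood hmin' hpost'⟩

theorem pvA_good (n : Int) (c : Int) (s : String) (hn : 0 < n)
    (hlen : n ≤ (s.toList.length : Int)) :
    pvGoodAt c s.toList n.toNat (max_length_substring n c s) := by
  have hlen' : n.toNat ≤ s.toList.length := by omega
  have hrange : PySem.List.pyRange 0 n 1 = (List.range n.toNat).map (fun (j : Nat) => (j : Int)) := by
    rw [PySem.List.pyRange_one]
    simp
  have key : ∀ m : Nat, m ≤ s.toList.length → pvAInv c s.toList m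
      (((List.range m).map (fun (j : Nat) => (j : Int))).foldl (fun st right =>
        let upd :=
          match PySem.Str.pyGet? s right with
          | some ch =>
            if ch = 'a' then (st.2.1 + 1, st.2.2.1, st.2.2.2.1)
            else if ch = 'b' then (st.2.1, st.2.2.1 + 1, st.2.2.2.1 + st.2.1)
            else (st.2.1, st.2.2.1, st.2.2.2.1)
          | none => (st.2.1, st.2.2.1, st.2.2.2.1)
        let sh := pvShrinkA s c right st.1 upd.1 upd.2.1 upd.2.2
        (sh.1, sh.2.1, sh.2.2.1, sh.2.2.2, max st.2.2.2.2 (right - sh.1 + 1)))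
      ((0 : Int), (0 : Int), (0 : Int), (0 : Int), (0 : Int))) := by
    intro m
    induction m with
    | zero =>
      intro _
      simp only [List.range_zero, List.map_nil, List.foldl_nil]
      refine ⟨0, rfl, le_refl _, rfl, fun l hl => absurd hl (by omega), Or.inr rfl,
        le_refl _, ?_, Or.inl rfl⟩
      intro l r hlr hrm _
      show (r : Int) - (l : Int) ≤ (0 : Int)
      omega
    | succ j ihm =>
      intro hj
      rw [List.range_succ, List.map_append, List.foldl_append]
      exact pvA_step s c j (by omega) _ (ihm (by omega))
  obtain ⟨L, _h1, _h2, _h3, _h4, _h5, hgood⟩ := key n.toNat hlen'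
  unfold max_length_substring
  rw [hrange]
  exact hgood

-- ===== B-side =====

-- B-side invariants
def pvOutInv (c : Int) (t : List Char) (m : Nat) (L : Nat) (b : Int) : Prop :=
  0 ≤ b ∧
  (∀ l r : Nat, l < L → l ≤ r → r ≤ m → (pvCnt (pvWnd t l r)).2.2 ≤ c → (r : Int) - (l : Int) ≤ b) ∧
  (b = 0 ∨ ∃ l r : Nat, l ≤ r ∧ r ≤ m ∧ (pvCnt (pvWnd t l r)).2.2 ≤ c ∧ b = (r : Int) - (l : Int))

theorem pvB_step (s : String) (c : Int) (l i : Nat) (hlen : l + i < s.toList.length)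
    (st : Int × Int × Int)
    (h1 : st.1 = (pvCnt (pvWnd s.toList l (l + i))).1)
    (h2 : st.2.1 = (pvCnt (pvWnd s.toList l (l + i))).2.2) :
    (let upd :=
        match PySem.Str.pyGet? s ((l : Int) + (i : Int)) with
        | some ch =>
          if ch = 'a' then (st.1 + 1, st.2.1)
          else if ch = 'b' then (st.1, st.2.1 + st.1)
          else (st.1, st.2.1)
        | none => (st.1, st.2.1)
      (upd.1, upd.2, if upd.2 ≤ c then max st.2.2 (((l : Int) + (i : Int)) - (l : Int) + 1) else st.2.2))
      = ((pvCnt (pvWnd s.toList l (l + i + 1))).1, (pvCnt (pvWnd s.toList l (l + i + 1))).2.2,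
         if (pvCnt (pvWnd s.toList l (l + i + 1))).2.2 ≤ c then max st.2.2 ((i : Int) + 1) else st.2.2) := by
  have hget : PySem.Str.pyGet? s ((l : Int) + (i : Int)) = some (s.toList[l + i]) := by
    have hcast : ((l : Int) + (i : Int)) = ((l + i : Nat) : Int) := by push_cast; ring
    rw [hcast, PySem.Str.pyGet?_natCast, List.getElem?_eq_getElem hlen]
  have hw : pvWnd s.toList l (l + i + 1) = pvWnd s.toList l (l + i) ++ [s.toList[l + i]] :=
    pvWnd_succ_right _ _ _ (by omega) hlen
  have hmax : (((l : Int) + (i : Int)) - (l : Int) + 1) = ((i : Int) + 1) := by ring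
  dsimp only
  simp only [hget, hmax]
  rw [hw, pvCnt_snoc]
  unfold pvG3
  by_cases ha : s.toList[l + i] = 'a'
  · simp [ha, h1, h2]
  · by_cases hb : s.toList[l + i] = 'b'
    · simp [ha, hb, h1, h2]
    · simp [ha, hb, h1, h2]

theorem pvB_inner (s : String) (c : Int) (l : Nat) (b0 : Int) (hb0 : 0 ≤ b0) :
    ∀ I : Nat, l + I ≤ s.toList.length →
    ((((List.range I).map (fun (k : Nat) => (l : Int) + (k : Int))).foldl (fun st r =>
        let upd :=
          match PySem.Str.pyGet? s r with
          | some ch =>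
            if ch = 'a' then (st.1 + 1, st.2.1)
            else if ch = 'b' then (st.1, st.2.1 + st.1)
            else (st.1, st.2.1)
          | none => (st.1, st.2.1)
        (upd.1, upd.2, if upd.2 ≤ c then max st.2.2 (r - (l : Int) + 1) else st.2.2))
      ((0 : Int), (0 : Int), b0)).1 = (pvCnt (pvWnd s.toList l (l + I))).1 ∧
     (((List.range I).map (fun (k : Nat) => (l : Int) + (k : Int))).foldl (fun st r =>
        let upd :=
          match PySem.Str.pyGet? s r with
          | some ch =>
            if ch = 'a' then (st.1 + 1, st.2.1)
            else if ch = 'b' then (st.1, st.2.1 + st.1)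
            else (st.1, st.2.1)
          | none => (st.1, st.2.1)
        (upd.1, upd.2, if upd.2 ≤ c then max st.2.2 (r - (l : Int) + 1) else st.2.2))
      ((0 : Int), (0 : Int), b0)).2.1 = (pvCnt (pvWnd s.toList l (l + I))).2.2 ∧
     b0 ≤ (((List.range I).map (fun (k : Nat) => (l : Int) + (k : Int))).foldl (fun st r =>
        let upd :=
          match PySem.Str.pyGet? s r with
          | some ch =>
            if ch = 'a' then (st.1 + 1, st.2.1)
            else if ch = 'b' then (st.1, st.2.1 + st.1)
            else (st.1, st.2.1)
          | none => (st.1, st.2.1)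
        (upd.1, upd.2, if upd.2 ≤ c then max st.2.2 (r - (l : Int) + 1) else st.2.2))
      ((0 : Int), (0 : Int), b0)).2.2 ∧
     (∀ r : Nat, l < r → r ≤ l + I → (pvCnt (pvWnd s.toList l r)).2.2 ≤ c →
        (r : Int) - (l : Int) ≤ (((List.range I).map (fun (k : Nat) => (l : Int) + (k : Int))).foldl (fun st r =>
        let upd :=
          match PySem.Str.pyGet? s r with
          | some ch =>
            if ch = 'a' then (st.1 + 1, st.2.1)
            else if ch = 'b' then (st.1, st.2.1 + st.1)
            else (st.1, st.2.1)
          | none => (st.1, st.2.1)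
        (upd.1, upd.2, if upd.2 ≤ c then max st.2.2 (r - (l : Int) + 1) else st.2.2))
      ((0 : Int), (0 : Int), b0)).2.2) ∧
     ((((List.range I).map (fun (k : Nat) => (l : Int) + (k : Int))).foldl (fun st r =>
        let upd :=
          match PySem.Str.pyGet? s r with
          | some ch =>
            if ch = 'a' then (st.1 + 1, st.2.1)
            else if ch = 'b' then (st.1, st.2.1 + st.1)
            else (st.1, st.2.1)
          | none => (st.1, st.2.1)
        (upd.1, upd.2, if upd.2 ≤ c then max st.2.2 (r - (l : Int) + 1) else st.2.2))
      ((0 : Int), (0 : Int), b0)).2.2 = b0 ∨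
      ∃ r : Nat, l < r ∧ r ≤ l + I ∧ (pvCnt (pvWnd s.toList l r)).2.2 ≤ c ∧
        (((List.range I).map (fun (k : Nat) => (l : Int) + (k : Int))).foldl (fun st r =>
        let upd :=
          match PySem.Str.pyGet? s r with
          | some ch =>
            if ch = 'a' then (st.1 + 1, st.2.1)
            else if ch = 'b' then (st.1, st.2.1 + st.1)
            else (st.1, st.2.1)
          | none => (st.1, st.2.1)
        (upd.1, upd.2, if upd.2 ≤ c then max st.2.2 (r - (l : Int) + 1) else st.2.2))
      ((0 : Int), (0 : Int), b0)).2.2 = (r : Int) - (l : Int))) := by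
  intro I
  induction I with
  | zero =>
    intro _
    simp only [List.range_zero, List.map_nil, List.foldl_nil, Nat.add_zero]
    refine ⟨by rw [pvWnd_nil]; rfl, by rw [pvWnd_nil]; rfl, le_refl _, ?_, Or.inl trivial⟩
    intro r h1 h2 _
    omega
  | succ I ih =>
    intro hI
    obtain ⟨ih1, ih2, ih3, ih4, ih5⟩ := ih (by omega)
    rw [List.range_succ, List.map_append, List.map_singleton, List.foldl_append,
      List.foldl_cons, List.foldl_nil]
    generalize hgen : (((List.range I).map (fun (k : Nat) => (l : Int) + (k : Int))).foldl (fun st r =>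
        let upd :=
          match PySem.Str.pyGet? s r with
          | some ch =>
            if ch = 'a' then (st.1 + 1, st.2.1)
            else if ch = 'b' then (st.1, st.2.1 + st.1)
            else (st.1, st.2.1)
          | none => (st.1, st.2.1)
        (upd.1, upd.2, if upd.2 ≤ c then max st.2.2 (r - (l : Int) + 1) else st.2.2))
      ((0 : Int), (0 : Int), b0)) = stI at ih1 ih2 ih3 ih4 ih5 ⊢
    rw [pvB_step s c l I (by omega) stI ih1 ih2]
    dsimp only
    by_cases hfeas : (pvCnt (pvWnd s.toList l (l + I + 1))).2.2 ≤ c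
    · rw [if_pos hfeas]
      have hm1 := le_max_left stI.2.2 ((I : Int) + 1)
      have hm2 := le_max_right stI.2.2 ((I : Int) + 1)
      refine ⟨rfl, rfl, by omega, ?_, ?_⟩
      · intro r h1 h2 hf
        rcases Nat.lt_succ_iff_lt_or_eq.mp (Nat.lt_succ_of_le h2) with h | h
        · have := ih4 r h1 (by omega) hf
          omega
        · have hr : r = l + I + 1 := by omega
          subst hr
          have hc2 : ((l + I + 1 : Nat) : Int) - (l : Int) = (I : Int) + 1 := by push_cast; ring
          omega
      · rcases max_cases stI.2.2 ((I : Int) + 1) with ⟨hmx, _⟩ | ⟨hmx, _⟩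
        · rw [hmx]
          rcases ih5 with h | ⟨r, h1, h2, h3, h4⟩
          · exact Or.inl h
          · exact Or.inr ⟨r, h1, by omega, h3, h4⟩
        · rw [hmx]
          refine Or.inr ⟨l + I + 1, by omega, le_refl _, hfeas, by push_cast; ring⟩
    · rw [if_neg hfeas]
      refine ⟨rfl, rfl, ih3, ?_, ?_⟩
      · intro r h1 h2 hf
        rcases Nat.lt_succ_iff_lt_or_eq.mp (Nat.lt_succ_of_le h2) with h | h
        · exact ih4 r h1 (by omega) hf
        · have hr : r = l + I + 1 := by omega
          subst hr
          exact absurd hf hfeas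
      · rcases ih5 with h | ⟨r, h1, h2, h3, h4⟩
        · exact Or.inl h
        · exact Or.inr ⟨r, h1, by omega, h3, h4⟩

theorem pvB_good (n : Int) (c : Int) (s : String) (hn : 0 < n)
    (hlen : n ≤ (s.toList.length : Int)) :
    pvGoodAt c s.toList n.toNat (max_length_substring_alt n c s) := by
  have hlen' : n.toNat ≤ s.toList.length := by omega
  have hrange : PySem.List.pyRange 0 n 1 = (List.range n.toNat).map (fun (j : Nat) => (j : Int)) := by
    rw [PySem.List.pyRange_one]
    simp
  have outkey : ∀ L : Nat, L ≤ n.toNat → pvOutInv c s.toList n.toNat L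
      (((List.range L).map (fun (j : Nat) => (j : Int))).foldl (fun best l =>
        ((PySem.List.pyRange l n 1).foldl (fun st r =>
            let upd :=
              match PySem.Str.pyGet? s r with
              | some ch =>
                if ch = 'a' then (st.1 + 1, st.2.1)
                else if ch = 'b' then (st.1, st.2.1 + st.1)
                else (st.1, st.2.1)
              | none => (st.1, st.2.1)
            (upd.1, upd.2, if upd.2 ≤ c then max st.2.2 (r - l + 1) else st.2.2))
          ((0 : Int), (0 : Int), best)).2.2) 0) := by
    intro L
    induction L with
    | zero =>
      intro _
      simp only [List.range_zero, List.map_nil, List.foldl_nil]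
      exact ⟨le_refl _, fun l r hl => absurd hl (by omega), Or.inl rfl⟩
    | succ L ihL =>
      intro hL1
      rw [List.range_succ, List.map_append, List.map_singleton, List.foldl_append,
        List.foldl_cons, List.foldl_nil]
      have hcast : (n - (L : Int)).toNat = n.toNat - L := by omega
      have hinrange : PySem.List.pyRange (L : Int) n 1
          = (List.range (n.toNat - L)).map (fun (k : Nat) => (L : Int) + (k : Int)) := by
        rw [PySem.List.pyRange_one, hcast]
      have harg : L + (n.toNat - L) ≤ s.toList.length := by omega
      have hLI : L + (n.toNat - L) = n.toNat := by omega
      obtain ⟨hb0, hub, hat⟩ := ihL (by omega)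
      rw [hinrange]
      obtain ⟨_g1, _g2, hb0', hub', hat'⟩ :=
        pvB_inner s c L _ hb0 (n.toNat - L) harg
      rw [hLI] at hub' hat'
      refine ⟨by omega, ?_, ?_⟩
      · intro l r hl hlr hrm hf
        rcases Nat.lt_succ_iff_lt_or_eq.mp hl with h | h
        · have := hub l r h hlr hrm hf; omega
        · subst h
          rcases Nat.eq_or_lt_of_le hlr with h2 | h2
          · subst h2; omega
          · exact hub' r h2 hrm hf
      · rcases hat' with heq | ⟨r, h1, h2, h3, h4⟩
        · rw [heq]
          rcases hat with h0 | ⟨l, r, h1, h2, h3, h4⟩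
          · exact Or.inl h0
          · exact Or.inr ⟨l, r, h1, h2, h3, h4⟩
        · exact Or.inr ⟨L, r, by omega, h2, h3, h4⟩
  obtain ⟨hb0, hub, hat⟩ := outkey n.toNat (le_refl _)
  unfold max_length_substring_alt
  rw [hrange]
  refine ⟨hb0, ?_, hat⟩
  intro l r hlr hrm hf
  rcases Nat.eq_or_lt_of_le (hrm : r ≤ n.toNat) with h | h
  · rcases Nat.eq_or_lt_of_le hlr with h2 | h2
    · subst h2; omega
    · exact hub l r (by omega) hlr hrm hf
  · exact hub l r (by omega) hlr hrm hf

-- ===== VERDICT (by name: the statement is the Claim_ definition above) =====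
theorem max_length_substring_spec : Claim_equal_max_length_substring := by
  intro n c s _hdom hpre
  unfold Spec_max_length_substring
  by_cases hn : 0 < n
  · exact pvGoodAt_unique (pvA_good n c s hn hpre) (pvB_good n c s hn hpre)
  · have h0 : PySem.List.pyRange 0 n 1 = [] := PySem.List.pyRange_one_eq_nil (by omega)
    simp [max_length_substring, max_length_substring_alt, h0]
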